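-- pv_equiv track=rewrite | github.com/testing678613-bot/Automation- | autoreply.py | is_auto_reply_loop
-- ===== SOURCE A (Python) =====
-- AUTO_REPLY_MARKERS = [
--     "auto-reply", "auto reply", "autoreply", "automated response",
--     "i am currently unavailable", "i'm currently unavailable",
--     "this is an automated", "auto response"
-- ]
--
-- def is_auto_reply_loop(text: str) -> bool:
--     if not text:
--         return False
--     lower = text.lower()
--     for marker in AUTO_REPLY_MARKERS:
--         if marker in lower:
--             return True
--     return False
-- ===== SOURCE B (Python) =====
-- AUTO_REPLY_MARKERS = [
--     "auto-reply", "auto reply", "autoreply", "automated response",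
--     "i am currently unavailable", "i'm currently unavailable",
--     "this is an automated", "auto response"
-- ]
--
-- def is_auto_reply_loop(text: str) -> bool:
--     # single left-to-right pass: at each position, test whether some marker starts there
--     low = text.lower()
--     for i in range(len(low)):
--         if any(low.startswith(m, i) for m in AUTO_REPLY_MARKERS):
--             return True
--     return False
-- ===== Notes on version B (the rewrite author's own statement) =====
-- stated objective: alternative
-- what changed: Replaced the per-marker loop of eight independent substring scans by one left-to-right pass over the text positions, testing at each position whether any marker starts there (startswith with an offset).
import Mathlib
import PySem

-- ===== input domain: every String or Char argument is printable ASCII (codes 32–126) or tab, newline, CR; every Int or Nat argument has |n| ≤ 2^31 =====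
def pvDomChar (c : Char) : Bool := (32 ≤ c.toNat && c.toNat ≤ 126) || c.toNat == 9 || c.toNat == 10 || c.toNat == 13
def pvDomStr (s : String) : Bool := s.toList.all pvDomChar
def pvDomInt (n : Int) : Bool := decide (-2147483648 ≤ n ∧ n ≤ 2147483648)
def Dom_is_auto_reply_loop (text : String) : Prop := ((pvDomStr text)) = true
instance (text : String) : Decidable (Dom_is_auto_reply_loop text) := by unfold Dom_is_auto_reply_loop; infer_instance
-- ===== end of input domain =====

-- B replaces A's eight separate substring scans by a single pass over text positions; proved equal here.

-- the module constant AUTO_REPLY_MARKERS (shared data of both ports)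
def pvMarkers : List (List Char) :=
  ["auto-reply".toList, "auto reply".toList, "autoreply".toList, "automated response".toList,
   "i am currently unavailable".toList, "i'm currently unavailable".toList,
   "this is an automated".toList, "auto response".toList]

-- ===== PORT A =====
-- 'if not text: return False; lower = text.lower(); for marker in MARKERS: if marker in lower: return True; return False'
def is_auto_reply_loop (text : String) : Bool :=
  if text.toList.isEmpty then false
  else
    let lower := PySem.Chars.lower text.toList
    pvMarkers.any (fun marker => PySem.Chars.isIn marker lower)

-- ===== PORT B =====
-- 'low = text.lower(); for i in range(len(low)): if any(low.startswith(m, i) for m in MARKERS): return True; return False'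
def is_auto_reply_loop_alt (text : String) : Bool :=
  let low := PySem.Chars.lower text.toList
  (List.range low.length).any (fun i =>
    pvMarkers.any (fun m => PySem.Chars.startswith (low.drop i) m))

-- ===== PRECONDITION & SPEC =====
def Spec_is_auto_reply_loop (text : String) (out : Bool) : Prop := out = is_auto_reply_loop_alt text
instance (text : String) (out : Bool) : Decidable (Spec_is_auto_reply_loop text out) := by unfold Spec_is_auto_reply_loop; infer_instance

-- ===== CLAIM (what is proved, stated in full; the proofs are below) =====
def Claim_equal_is_auto_reply_loop : Prop := ∀ (text : String), Dom_is_auto_reply_loop text → Spec_is_auto_reply_loop text (is_auto_reply_loop text)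

-- ===== LEMMAS AND PROOFS =====

-- every marker is a nonempty string
theorem pvMarkers_ne_nil : ∀ m ∈ pvMarkers, m ≠ [] := by decide

-- a nonempty pattern is an infix of low iff it is a prefix at some position strictly inside low
theorem infix_iff_prefix_at_pos (m low : List Char) (hm : m ≠ []) :
    m <:+: low ↔ ∃ i < low.length, m <+: low.drop i := by
  constructor
  · intro h
    have h' : PySem.Chars.isIn m low = true := (PySem.Chars.isIn_iff_infix m low).mpr h
    obtain ⟨j, hj⟩ := (PySem.Chars.exists_prefix_drop_iff_isIn m low).mpr h'
    refine ⟨j, ?_, hj⟩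
    by_contra hlen
    have : low.drop j = [] := List.drop_eq_nil_of_le (by omega)
    rw [this] at hj
    exact hm (List.prefix_nil.mp hj)
  · rintro ⟨i, _, hi⟩
    exact (PySem.Chars.isIn_iff_infix m low).mp
      ((PySem.Chars.exists_prefix_drop_iff_isIn m low).mp ⟨i, hi⟩)

-- the core equivalence on the lowered character list
theorem pvKey (low : List Char) :
    pvMarkers.any (fun marker => PySem.Chars.isIn marker low)
      = (List.range low.length).any (fun i =>
          pvMarkers.any (fun m => PySem.Chars.startswith (low.drop i) m)) := by
  cases h : pvMarkers.any (fun marker => PySem.Chars.isIn marker low) with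
  | false =>
    symm
    simp only [List.any_eq_false, List.mem_range] at h ⊢
    intro i hi hany
    rw [List.any_eq_true] at hany
    obtain ⟨m, hm, hsw⟩ := hany
    exact (h m hm) ((PySem.Chars.isIn_iff_infix m low).mpr
      ((infix_iff_prefix_at_pos m low (pvMarkers_ne_nil m hm)).mpr
        ⟨i, hi, (PySem.Chars.startswith_iff _ _).mp hsw⟩))
  | true =>
    symm
    simp only [List.any_eq_true] at h
    obtain ⟨m, hm, hin⟩ := h
    obtain ⟨i, hilt, hpre⟩ := (infix_iff_prefix_at_pos m low (pvMarkers_ne_nil m hm)).mp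
      ((PySem.Chars.isIn_iff_infix m low).mp hin)
    rw [List.any_eq_true]
    exact ⟨i, List.mem_range.mpr hilt, by
      rw [List.any_eq_true]
      exact ⟨m, hm, (PySem.Chars.startswith_iff _ _).mpr hpre⟩⟩

-- ===== VERDICT (by name: the statement is the Claim_ definition above) =====
theorem is_auto_reply_loop_spec : Claim_equal_is_auto_reply_loop := by
  intro text _
  unfold Spec_is_auto_reply_loop
  by_cases he : text.toList.isEmpty
  · have hl : PySem.Chars.lower text.toList = [] := by rw [List.isEmpty_iff.mp he]; rfl
    simp [is_auto_reply_loop, is_auto_reply_loop_alt, he, hl]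
  · simp [is_auto_reply_loop, is_auto_reply_loop_alt, he, pvKey]
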